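-- pv_equiv track=rewrite | github.com/matel2394/project | Python.git/문제 만들기/1차시 문제만들기/문제1.py | solution
-- ===== SOURCE A (Python) =====
-- def solution(age):
--     answer = [0 for _ in range(6)]
--     for i in age:
--         if i == 8:
--             answer[0] += 1
--         if i == 9:
--             answer[1] += 1
--         if i == 10:
--             answer[2] += 1
--         if i == 11:
--             answer[3] += 1
--         if i == 12:
--             answer[4] += 1
--         if i == 13:
--             answer[5] += 1
--     return answer
-- ===== SOURCE B (Python) =====
-- def solution(age):
--     return [age.count(a) for a in range(8, 14)]
-- ===== Notes on version B (the rewrite author's own statement) =====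
-- stated objective: idiomatic
-- what changed: Replaces the single pass with six guarded inline accumulators by a per-value projection: for each age in range(8,14) count its occurrences with list.count, building the result as a comprehension.
import Mathlib
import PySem

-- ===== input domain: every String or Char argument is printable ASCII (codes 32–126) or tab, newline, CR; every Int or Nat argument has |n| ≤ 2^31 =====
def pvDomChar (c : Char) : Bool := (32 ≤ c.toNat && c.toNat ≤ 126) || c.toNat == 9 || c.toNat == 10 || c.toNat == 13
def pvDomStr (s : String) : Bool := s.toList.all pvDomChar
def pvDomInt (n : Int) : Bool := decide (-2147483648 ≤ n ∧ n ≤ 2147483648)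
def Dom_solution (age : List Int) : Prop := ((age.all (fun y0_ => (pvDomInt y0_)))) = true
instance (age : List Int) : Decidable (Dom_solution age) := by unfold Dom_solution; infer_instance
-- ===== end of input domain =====

-- B counts each target age with a separate list.count pass (idiomatic comprehension) instead of A's six inline accumulators; same values, not faster.

-- ===== PORT A =====
-- one loop step: the six independent 'if i == k: answer[j] += 1' updates
def solutionStep (answer : List Int) (i : Int) : List Int :=
  let answer := if i == 8 then answer.set 0 (answer.getD 0 0 + 1) else answer
  let answer := if i == 9 then answer.set 1 (answer.getD 1 0 + 1) else answer
  let answer := if i == 10 then answer.set 2 (answer.getD 2 0 + 1) else answer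
  let answer := if i == 11 then answer.set 3 (answer.getD 3 0 + 1) else answer
  let answer := if i == 12 then answer.set 4 (answer.getD 4 0 + 1) else answer
  let answer := if i == 13 then answer.set 5 (answer.getD 5 0 + 1) else answer
  answer

def solution (age : List Int) : List Int :=
  age.foldl solutionStep (List.replicate 6 0)

-- ===== PORT B =====
def solution_alt (age : List Int) : List Int :=
  (PySem.List.pyRange 8 14 1).map (fun a => PySem.List.count age a)

-- ===== PRECONDITION & SPEC =====
def Spec_solution (age : List Int) (out : List Int) : Prop := out = solution_alt age
instance (age : List Int) (out : List Int) : Decidable (Spec_solution age out) := by unfold Spec_solution; infer_instance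

-- ===== CLAIM (what is proved, stated in full; the proofs are below) =====
def Claim_equal_solution : Prop := ∀ (age : List Int), Dom_solution age → Spec_solution age (solution age)

-- ===== LEMMAS AND PROOFS =====

-- one step of A's loop, written pointwise: slot j gains 1 exactly when i is its target
lemma solutionStep_eq (c0 c1 c2 c3 c4 c5 i : Int) :
    solutionStep [c0, c1, c2, c3, c4, c5] i =
      [c0 + (if i = 8 then 1 else 0), c1 + (if i = 9 then 1 else 0),
       c2 + (if i = 10 then 1 else 0), c3 + (if i = 11 then 1 else 0),
       c4 + (if i = 12 then 1 else 0), c5 + (if i = 13 then 1 else 0)] := by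
  simp only [solutionStep, beq_iff_eq]
  split_ifs with h8 h9 h10 h11 h12 h13 <;> simp_all

-- invariant of A's loop: each slot accumulates the count of its target age
lemma solution_loop (age : List Int) :
    ∀ (c0 c1 c2 c3 c4 c5 : Int),
      age.foldl solutionStep [c0, c1, c2, c3, c4, c5] =
        [c0 + PySem.List.count age 8, c1 + PySem.List.count age 9,
         c2 + PySem.List.count age 10, c3 + PySem.List.count age 11,
         c4 + PySem.List.count age 12, c5 + PySem.List.count age 13] := by
  induction age with
  | nil => intro c0 c1 c2 c3 c4 c5; simp [PySem.List.count]
  | cons x xs ih =>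
      intro c0 c1 c2 c3 c4 c5
      rw [List.foldl_cons, solutionStep_eq, ih]
      simp [PySem.List.count, List.count_cons]
      refine ⟨by omega, by omega, by omega, by omega, by omega, by omega⟩

-- ===== VERDICT (by name: the statement is the Claim_ definition above) =====
theorem solution_spec : Claim_equal_solution := by
  intro age _
  show solution age = solution_alt age
  have : (List.replicate 6 (0:Int)) = [0,0,0,0,0,0] := by decide
  rw [solution, this, solution_loop]
  have hr : PySem.List.pyRange 8 14 1 = [8, 9, 10, 11, 12, 13] := by decide
  simp [solution_alt, hr]
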